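-- pv_equiv track=rewrite | github.com/Wayslit/IDB-FOIL | model/FOIL_Bird.py | get_new_total_list
-- ===== SOURCE A (Python) =====
-- import math,re,copy,json,time,random,yaml,os
--
-- def get_new_total_list(result_list,total_list):
--     del_number_hd=[]
--     new_total=copy.deepcopy(total_list)
--     for i in range(len(result_list)):
--         if i!=len(result_list)-1:
--             for image_number,image in enumerate(total_list):
--                 del_result=True
--                 for clause in result_list[i]:
--                     if (clause not in image):
--                         del_result=False
--                         break
--                 if del_result==True:
--                     del_number_hd.append(image_number)
--         else:
--             for image_number,image in enumerate(total_list):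
--                 for clause in result_list[i]:
--                     if (clause not in image):
--                         del_number_hd.append(image_number)
--                         break
--     del_number=list(set(del_number_hd))
--     del_number.sort()
--     for i in range(len(del_number)):
--         del new_total[del_number[len(del_number)-1-i]]
--     return new_total
-- ===== SOURCE B (Python) =====
-- import copy
--
-- def get_new_total_list(result_list, total_list):
--     # Single pass over total_list: keep an image iff it is NOT a superset of any
--     # non-last clause row and DOES contain every clause of the last row.
--     if not result_list:
--         return copy.deepcopy(total_list)
--     front, last = result_list[:-1], result_list[-1]
--     return [copy.deepcopy(image) for image in total_list
--             if not any(all(c in image for c in row) for row in front)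
--             and all(c in image for c in last)]
-- ===== Notes on version B (the rewrite author's own statement) =====
-- stated objective: simpler
-- what changed: Replaces A's three-phase machinery (collect delete-indices per row, dedupe via set, sort, delete from the back) by one direct filter over total_list with a per-image keep predicate, building the survivor list in order.
import Mathlib
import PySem

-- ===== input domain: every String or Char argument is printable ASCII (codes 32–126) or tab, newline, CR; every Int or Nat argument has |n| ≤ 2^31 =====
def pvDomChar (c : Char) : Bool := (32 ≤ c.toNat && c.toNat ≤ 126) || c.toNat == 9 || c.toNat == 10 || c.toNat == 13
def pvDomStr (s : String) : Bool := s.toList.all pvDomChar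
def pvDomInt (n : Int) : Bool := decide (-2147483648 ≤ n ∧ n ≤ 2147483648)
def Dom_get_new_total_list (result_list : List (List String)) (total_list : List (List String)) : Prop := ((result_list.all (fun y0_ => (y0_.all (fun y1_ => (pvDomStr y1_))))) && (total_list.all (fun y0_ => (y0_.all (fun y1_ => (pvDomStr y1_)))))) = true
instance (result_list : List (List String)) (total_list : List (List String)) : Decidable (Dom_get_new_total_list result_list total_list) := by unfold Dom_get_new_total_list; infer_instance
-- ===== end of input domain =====

-- B replaces A's index-collection / set-dedupe / reverse-delete machinery by one direct
-- filter of total_list with a per-image keep predicate (objective: simpler).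

-- ===== PORT A =====
-- inner clause loop with break: del_result stays True iff every clause is in image
def pvCheckRow (row : List String) (image : List String) : Bool :=
  match row with
  | [] => true
  | c :: rest => if !(image.contains c) then false else pvCheckRow rest image

-- non-last branch: append image_number when all clauses of the row are in the image
def pvFlagSup (row : List String) (total : List (List String)) : List Int :=
  (PySem.List.enumerate total).foldl
    (fun acc ji => if pvCheckRow row ji.2 then acc ++ [ji.1] else acc) []

-- last branch: append image_number when some clause of the row is missing (break)
def pvFlagMiss (row : List String) (total : List (List String)) : List Int :=
  (PySem.List.enumerate total).foldl
    (fun acc ji => if !(pvCheckRow row ji.2) then acc ++ [ji.1] else acc) []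

-- the outer 'for i in range(len(result_list))' loop, accumulating del_number_hd
def pvPhase (rows : List (List String)) (i : Nat) (n : Nat)
    (total : List (List String)) : List Int :=
  match rows with
  | [] => []
  | r :: rest =>
      (if i ≠ n - 1 then pvFlagSup r total else pvFlagMiss r total) ++ pvPhase rest (i + 1) n total

def get_new_total_list (result_list : List (List String)) (total_list : List (List String)) : List (List String) :=
  let del_number_hd := pvPhase result_list 0 result_list.length total_list
  let del_number := PySem.List.sorted (PySem.Set.ofList del_number_hd) (fun x => x) false
  -- 'del new_total[k]' from the largest index down; indices come from enumerate so are ≥ 0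
  -- and in range (toNat is exact there)
  (List.range del_number.length).foldl
    (fun acc i => acc.eraseIdx (del_number.getD (del_number.length - 1 - i) 0).toNat)
    total_list

-- ===== PORT B =====
def pvHasAll (image : List String) (row : List String) : Bool :=
  row.all (fun c => image.contains c)

def get_new_total_list_alt (result_list : List (List String)) (total_list : List (List String)) : List (List String) :=
  match result_list.getLast? with
  | none => total_list
  | some last =>
      let front := result_list.dropLast
      total_list.filter
        (fun image => !(front.any (fun row => pvHasAll image row)) && pvHasAll image last)

-- ===== PRECONDITION & SPEC =====
def Spec_get_new_total_list (result_list : List (List String)) (total_list : List (List String)) (out : List (List String)) : Prop := out = get_new_total_list_alt result_list total_list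
instance (result_list : List (List String)) (total_list : List (List String)) (out : List (List String)) : Decidable (Spec_get_new_total_list result_list total_list out) := by unfold Spec_get_new_total_list; infer_instance

-- ===== CLAIM (what is proved, stated in full; the proofs are below) =====
def Claim_equal_get_new_total_list : Prop := ∀ (result_list : List (List String)) (total_list : List (List String)), Dom_get_new_total_list result_list total_list → Spec_get_new_total_list result_list total_list (get_new_total_list result_list total_list)

-- ===== LEMMAS AND PROOFS =====

-- "image is to be deleted" as a function of the clause rows (nonempty rows list)
def pvBadRows (rows : List (List String)) (img : List String) : Bool :=
  match rows with
  | [] => false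
  | [r] => !(pvCheckRow r img)
  | r :: rest => pvCheckRow r img || pvBadRows rest img

-- ascending list of the indices of xs whose element satisfies p
def pvIdxs (p : List String → Bool) : List (List String) → List Int
  | [] => []
  | x :: r => (if p x then [0] else []) ++ (pvIdxs p r).map (· + 1)

theorem pvCheckRow_eq_hasAll (row img : List String) :
    pvCheckRow row img = pvHasAll img row := by
  induction row with
  | nil => rfl
  | cons c rest ih =>
      simp only [pvCheckRow, pvHasAll, List.all_cons] at ih ⊢
      cases h : img.contains c <;> simp [h, ih]  -- h used in one branch

theorem mem_pvIdxs (p : List String → Bool) (xs : List (List String)) (j : Int) :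
    j ∈ pvIdxs p xs ↔ ∃ (k : Nat) (h : k < xs.length), j = (k : Int) ∧ p xs[k] = true := by
  induction xs generalizing j with
  | nil => simp [pvIdxs]
  | cons x r ih =>
      simp only [pvIdxs, List.mem_append, List.mem_map, ih]
      constructor
      · rintro (hj | ⟨a, ⟨k, hk, rfl, hp⟩, rfl⟩)
        · refine ⟨0, by simp, ?_, ?_⟩
          · by_cases h : p x = true <;> simp [h] at hj <;> simp [hj]
          · by_cases h : p x = true <;> simp [h] at hj ⊢
        · exact ⟨k + 1, by simp only [List.length_cons]; omega, by push_cast; ring, by simpa using hp⟩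
      · rintro ⟨k, hk, rfl, hp⟩
        cases k with
        | zero => left; simp at hp; simp [hp]
        | succ k' =>
            right
            have hk' : k' < r.length := by simp only [List.length_cons] at hk; omega
            exact ⟨k', ⟨k', hk', rfl, by simpa using hp⟩, by push_cast; ring⟩

theorem nonneg_of_mem_pvIdxs (p : List String → Bool) (xs : List (List String)) (j : Int)
    (h : j ∈ pvIdxs p xs) : 0 ≤ j := by
  rcases (mem_pvIdxs p xs j).1 h with ⟨k, _, rfl, _⟩; positivity

theorem pairwise_pvIdxs (p : List String → Bool) (xs : List (List String)) :
    (pvIdxs p xs).Pairwise (· < ·) := by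
  induction xs with
  | nil => simp [pvIdxs]
  | cons x r ih =>
      simp only [pvIdxs]
      rw [List.pairwise_append]
      refine ⟨?_, ?_, ?_⟩
      · by_cases h : p x = true <;> simp [h]
      · exact List.pairwise_map.2 (ih.imp (by omega))
      · intro a ha b hb
        by_cases h : p x = true <;> simp [h] at ha
        subst ha
        simp only [List.mem_map] at hb
        rcases hb with ⟨c, hc, rfl⟩
        have := nonneg_of_mem_pvIdxs p r c hc
        omega

theorem nodup_pvIdxs (p : List String → Bool) (xs : List (List String)) :
    (pvIdxs p xs).Nodup :=
  (pairwise_pvIdxs p xs).imp (fun h => by omega)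

theorem mem_pvFlagSup (row : List String) (tl : List (List String)) (j : Int) :
    j ∈ pvFlagSup row tl ↔ j ∈ pvIdxs (fun img => pvCheckRow row img) tl := by
  rw [mem_pvIdxs]
  simp only [pvFlagSup, PySem.List.foldl_append_if (f := fun (ji : Int × List String) => ji.1)]
  simp only [List.nil_append, List.mem_map, List.mem_filter,
    PySem.List.mem_enumerate_iff]
  constructor
  · rintro ⟨⟨a, b⟩, ⟨⟨k, hk, hab⟩, hp⟩, rfl⟩
    cases hab
    exact ⟨k, hk, by simp, by simpa using hp⟩
  · rintro ⟨k, hk, rfl, hp⟩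
    exact ⟨((k : Int), tl[k]), ⟨⟨k, hk, by simp⟩, by simpa using hp⟩, rfl⟩

theorem mem_pvFlagMiss (row : List String) (tl : List (List String)) (j : Int) :
    j ∈ pvFlagMiss row tl ↔ j ∈ pvIdxs (fun img => !(pvCheckRow row img)) tl := by
  rw [mem_pvIdxs]
  simp only [pvFlagMiss, PySem.List.foldl_append_if (f := fun (ji : Int × List String) => ji.1)]
  simp only [List.nil_append, List.mem_map, List.mem_filter,
    PySem.List.mem_enumerate_iff]
  constructor
  · rintro ⟨⟨a, b⟩, ⟨⟨k, hk, hab⟩, hp⟩, rfl⟩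
    cases hab
    exact ⟨k, hk, by simp, by simpa using hp⟩
  · rintro ⟨k, hk, rfl, hp⟩
    exact ⟨((k : Int), tl[k]), ⟨⟨k, hk, by simp⟩, by simpa using hp⟩, rfl⟩

theorem pvPhase_cons (r : List String) (rest : List (List String)) (i n : Nat)
    (tl : List (List String)) :
    pvPhase (r :: rest) i n tl
      = (if i ≠ n - 1 then pvFlagSup r tl else pvFlagMiss r tl) ++ pvPhase rest (i + 1) n tl := rfl

theorem pvIdxs_false (tl : List (List String)) : pvIdxs (fun _ => false) tl = [] := by
  induction tl with
  | nil => rfl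
  | cons x r ih => simp [pvIdxs, ih]

theorem mem_pvPhase (rows : List (List String)) (i n : Nat) (tl : List (List String))
    (hinv : i + rows.length = n) (j : Int) :
    j ∈ pvPhase rows i n tl ↔ j ∈ pvIdxs (fun img => pvBadRows rows img) tl := by
  induction rows generalizing i with
  | nil =>
      show j ∈ ([] : List Int) ↔ _
      simp only [pvBadRows, pvIdxs_false]
  | cons r rest ih =>
      cases rest with
      | nil =>
          have hi : ¬ (i ≠ n - 1) := by simp only [List.length_cons, List.length_nil] at hinv; omega
          rw [pvPhase_cons, if_neg hi]
          show j ∈ pvFlagMiss r tl ++ [] ↔ _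
          rw [List.append_nil, mem_pvFlagMiss]
          rfl
      | cons r2 rest' =>
          have hi : i ≠ n - 1 := by simp only [List.length_cons] at hinv; omega
          rw [pvPhase_cons, if_pos hi]
          rw [List.mem_append]
          rw [mem_pvFlagSup, ih (i + 1) (by simp only [List.length_cons] at hinv ⊢; omega)]
          simp only [mem_pvIdxs]
          constructor
          · rintro (⟨k, hk, rfl, hp⟩ | ⟨k, hk, rfl, hp⟩)
            · exact ⟨k, hk, rfl, by simp [pvBadRows, hp]⟩
            · exact ⟨k, hk, rfl, by simp [pvBadRows]; right; exact hp⟩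
          · rintro ⟨k, hk, rfl, hp⟩
            simp only [pvBadRows, Bool.or_eq_true] at hp
            rcases hp with hp | hp
            · exact Or.inl ⟨k, hk, rfl, hp⟩
            · exact Or.inr ⟨k, hk, rfl, hp⟩

-- sorted(set(del_number_hd)) is exactly the ascending index list pvIdxs
theorem sorted_set_eq_pvIdxs (hd : List Int) (p : List String → Bool)
    (tl : List (List String)) (hmem : ∀ j, j ∈ hd ↔ j ∈ pvIdxs p tl) :
    PySem.List.sorted (PySem.Set.ofList hd) (fun x => x) false = pvIdxs p tl := by
  apply PySem.List.sorted_eq_of_perm_of_pairwise_lt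
  · apply (List.perm_ext_iff_of_nodup (nodup_pvIdxs p tl) (PySem.Set.nodup_ofList hd)).2
    intro a
    rw [PySem.Set.mem_ofList, hmem]
  · exact pairwise_pvIdxs p tl

-- the reverse-indexed deletion loop is a left fold over the reversed index list
theorem range_fold_eq_reverse_fold {α : Type} (g : α → Int → α) (ds : List Int) (x : α) :
    (List.range ds.length).foldl (fun acc i => g acc (ds.getD (ds.length - 1 - i) 0)) x
      = ds.reverse.foldl g x := by
  have hmap : (List.range ds.length).map (fun i => ds.getD (ds.length - 1 - i) 0)
      = ds.reverse := by
    apply List.ext_getElem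
    · simp
    · intro i h1 h2
      simp only [List.getElem_map, List.getElem_range, List.getElem_reverse]
      simp only [List.length_map, List.length_range] at h1
      rw [List.getD_eq_getElem ds 0 (by omega)]
  rw [← hmap, List.foldl_map]

theorem map_add_one_fold_erase (ds : List Int) (hnn : ∀ j ∈ ds, 0 ≤ j)
    (x : List String) (r : List (List String)) :
    (ds.map (· + 1)).foldl (fun acc j => acc.eraseIdx j.toNat) (x :: r)
      = x :: ds.foldl (fun acc j => acc.eraseIdx j.toNat) r := by
  induction ds generalizing r with
  | nil => rfl
  | cons d rest ih =>
      have hd : 0 ≤ d := hnn d (by simp)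
      have h1 : (d + 1).toNat = d.toNat + 1 := by omega
      simp only [List.map_cons, List.foldl_cons, h1, List.eraseIdx_cons_succ]
      exact ih (fun j hj => hnn j (by simp [hj])) _

theorem fold_erase_pvIdxs (p : List String → Bool) (xs : List (List String)) :
    (pvIdxs p xs).reverse.foldl (fun acc j => acc.eraseIdx j.toNat) xs
      = xs.filter (fun a => !(p a)) := by
  induction xs with
  | nil => rfl
  | cons x r ih =>
      simp only [pvIdxs, List.reverse_append, List.foldl_append]
      rw [← List.map_reverse, map_add_one_fold_erase _
        (fun j hj => nonneg_of_mem_pvIdxs p r j (List.mem_reverse.1 hj)) x r, ih]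
      by_cases h : p x = true
      · simp [h, List.filter_cons]
      · simp [h, List.filter_cons]

-- B's keep predicate is the negation of pvBadRows (for a nonempty rows list)
theorem bpred_eq_not_bad (rows : List (List String)) (last : List String)
    (hl : rows.getLast? = some last) (img : List String) :
    (!(rows.dropLast.any (fun row => pvHasAll img row)) && pvHasAll img last)
      = !(pvBadRows rows img) := by
  induction rows generalizing last with
  | nil => simp at hl
  | cons r rest ih =>
      cases rest with
      | nil =>
          simp only [List.getLast?_singleton, Option.some.injEq] at hl
          subst hl
          simp [pvBadRows, pvCheckRow_eq_hasAll]
      | cons r2 rest' =>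
          have hl' : (r2 :: rest').getLast? = some last := by
            rwa [List.getLast?_cons_cons] at hl
          have := ih last hl'
          simp only [List.dropLast_cons₂, List.any_cons, pvBadRows] at *
          rw [pvCheckRow_eq_hasAll]
          cases hb : pvHasAll img r <;> simp [hb] at this ⊢ <;> simp [this]

-- ===== VERDICT (by name: the statement is the Claim_ definition above) =====
theorem get_new_total_list_spec : Claim_equal_get_new_total_list := by
  intro rl tl _
  unfold Spec_get_new_total_list
  cases hlast : rl.getLast? with
  | none =>
      have : rl = [] := by
        cases rl with
        | nil => rfl
        | cons a b => simp [List.getLast?_eq_some_getLast] at hlast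
      subst this
      simp [get_new_total_list, get_new_total_list_alt, pvPhase,
        PySem.Set.ofList, PySem.List.sorted]
  | some last =>
      have hA : get_new_total_list rl tl = tl.filter (fun a => !(pvBadRows rl a)) := by
        have hs : PySem.List.sorted
            (PySem.Set.ofList (pvPhase rl 0 rl.length tl)) (fun x => x) false
            = pvIdxs (fun img => pvBadRows rl img) tl :=
          sorted_set_eq_pvIdxs _ _ _ (fun j => mem_pvPhase rl 0 rl.length tl (by omega) j)
        simp only [get_new_total_list]
        rw [hs, range_fold_eq_reverse_fold (fun acc j => acc.eraseIdx j.toNat)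
          (pvIdxs (fun img => pvBadRows rl img) tl) tl, fold_erase_pvIdxs]
      rw [hA]
      unfold get_new_total_list_alt
      rw [hlast]
      exact (List.filter_congr (fun img _ => by rw [bpred_eq_not_bad rl last hlast img])).symm
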